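-- pv_equiv track=rewrite | github.com/Dominik727/bmeuzinfo | Tesztverseny/Tesztverseny/Tesztverseny.py | feladatsort_pontoz
-- ===== SOURCE A (Python) =====
-- def feladatsort_pontoz(helyesek, mostaniak):
--     pontszám = 0
--     for index in range(len(helyesek)):
--         if helyesek[index] == mostaniak[index]:
--             if 0 <= index <= 4:
--                 pontszám += 3
--             elif 5 <= index <= 9:
--                 pontszám += 4
--             elif 10 <= index <= 12:
--                 pontszám += 5
--             elif index == 13:
--                 pontszám += 6
--     return pontszám
-- ===== SOURCE B (Python) =====
-- def feladatsort_pontoz(helyesek, mostaniak):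
--     matches = [helyesek[i] == mostaniak[i] for i in range(len(helyesek))]
--     return (3 * sum(matches[:14]) + sum(matches[5:14])
--             + sum(matches[10:14]) + sum(matches[13:14]))
-- ===== Notes on version B (the rewrite author's own statement) =====
-- stated objective: alternative
-- what changed: Instead of deciding a weight per index with an if/elif cascade inside the loop, B builds the boolean match list once and assembles the score from four overlapping slice sums: 3*sum(m[:14]) + sum(m[5:14]) + sum(m[10:14]) + sum(m[13:14]).
import Mathlib
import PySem

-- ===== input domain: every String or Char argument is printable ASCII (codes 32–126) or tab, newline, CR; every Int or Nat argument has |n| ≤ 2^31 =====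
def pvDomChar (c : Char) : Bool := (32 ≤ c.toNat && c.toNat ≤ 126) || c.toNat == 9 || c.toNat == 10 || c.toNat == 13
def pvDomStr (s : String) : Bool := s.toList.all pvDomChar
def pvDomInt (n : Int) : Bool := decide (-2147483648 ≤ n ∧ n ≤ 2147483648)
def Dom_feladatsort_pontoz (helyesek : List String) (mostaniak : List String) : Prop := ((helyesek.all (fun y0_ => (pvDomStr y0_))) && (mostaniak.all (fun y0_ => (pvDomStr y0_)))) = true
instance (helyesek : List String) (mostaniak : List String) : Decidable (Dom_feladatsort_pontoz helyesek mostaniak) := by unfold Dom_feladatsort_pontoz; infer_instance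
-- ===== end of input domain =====

-- B replaces A's per-index if/elif weight cascade by building the match list once and
-- summing four overlapping prefix-band slices (3*sum(m[:14]) + sum(m[5:14]) + sum(m[10:14]) + sum(m[13:14]));
-- objective: alternative decomposition. Equivalence proved where mostaniak is long enough (both raise IndexError otherwise).
-- ===== PORT A =====
def feladatsort_pontoz (helyesek : List String) (mostaniak : List String) : Int :=
  (List.range helyesek.length).foldl (fun pontszam index =>
    if helyesek.getD index "" = mostaniak.getD index "" then
      if index ≤ 4 then pontszam + 3
      else if 5 ≤ index ∧ index ≤ 9 then pontszam + 4
      else if 10 ≤ index ∧ index ≤ 12 then pontszam + 5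
      else if index = 13 then pontszam + 6
      else pontszam
    else pontszam) 0

-- ===== PORT B =====
-- sum() over a Python list of bools: each True contributes 1
def pvBoolSum (l : List Bool) : Int :=
  l.foldl (fun a b => a + (if b then 1 else 0)) 0

-- matches = [helyesek[i] == mostaniak[i] for i in range(len(helyesek))]
def pvMatches (helyesek : List String) (mostaniak : List String) : List Bool :=
  (List.range helyesek.length).map (fun i => helyesek.getD i "" == mostaniak.getD i "")

def feladatsort_pontoz_alt (helyesek : List String) (mostaniak : List String) : Int :=
  let ms := pvMatches helyesek mostaniak
  3 * pvBoolSum (PySem.List.slice ms none (some 14))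
    + pvBoolSum (PySem.List.slice ms (some 5) (some 14))
    + pvBoolSum (PySem.List.slice ms (some 10) (some 14))
    + pvBoolSum (PySem.List.slice ms (some 13) (some 14))

-- ===== PRECONDITION & SPEC =====
-- Pre_ excludes exactly the inputs where Python A raises IndexError (mostaniak shorter than helyesek); B raises there too.
def Pre_feladatsort_pontoz (helyesek : List String) (mostaniak : List String) : Prop :=
  helyesek.length ≤ mostaniak.length
instance (helyesek : List String) (mostaniak : List String) : Decidable (Pre_feladatsort_pontoz helyesek mostaniak) := by unfold Pre_feladatsort_pontoz; infer_instance
def pvWitness_feladatsort_pontoz : List String × List String := (["a", "b"], ["a", "c"])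
def Spec_feladatsort_pontoz (helyesek : List String) (mostaniak : List String) (out : Int) : Prop := out = feladatsort_pontoz_alt helyesek mostaniak
instance (helyesek : List String) (mostaniak : List String) (out : Int) : Decidable (Spec_feladatsort_pontoz helyesek mostaniak out) := by unfold Spec_feladatsort_pontoz; infer_instance

-- ===== CLAIM (what is proved, stated in full; the proofs are below) =====
def Claim_equal_feladatsort_pontoz : Prop := ∀ (helyesek : List String) (mostaniak : List String), Dom_feladatsort_pontoz helyesek mostaniak → Pre_feladatsort_pontoz helyesek mostaniak → Spec_feladatsort_pontoz helyesek mostaniak (feladatsort_pontoz helyesek mostaniak)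

-- ===== LEMMAS AND PROOFS =====
-- appending one element to a band slice (drop a, take k) adds its value iff the new
-- position m.length lands inside the band [a, a+k)
theorem pv_band_snoc (m : List Bool) (x : Bool) (a k : Nat) :
    pvBoolSum (((m ++ [x]).drop a).take k)
      = pvBoolSum ((m.drop a).take k)
        + (if a ≤ m.length ∧ m.length < a + k then (if x then (1:Int) else 0) else 0) := by
  by_cases ha : a ≤ m.length
  · rw [List.drop_append_of_le_length ha]
    have hd : (m.drop a).length = m.length - a := List.length_drop
    by_cases hk : k ≤ (m.drop a).length
    · rw [List.take_append_of_le_length hk]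
      have : ¬ (a ≤ m.length ∧ m.length < a + k) := by omega
      simp [this]
    · have hlen : (m.drop a).length ≤ k := by omega
      have h1 : ((m.drop a) ++ [x]).length ≤ k := by
        simp only [List.length_append, List.length_cons, List.length_nil]
        omega
      rw [List.take_of_length_le h1, List.take_of_length_le hlen]
      have hcond : a ≤ m.length ∧ m.length < a + k := by omega
      simp [hcond, pvBoolSum, List.foldl_append]
  · by_cases hx : (m ++ [x]).length ≤ a
    · rw [List.drop_eq_nil_of_le hx, List.drop_eq_nil_of_le (by omega : m.length ≤ a)]
      have : ¬ (a ≤ m.length ∧ m.length < a + k) := by omega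
      simp [this]
    · exfalso
      simp at hx
      omega

-- main invariant: the cascade fold over range n equals the four-band decomposition of
-- the match list, for any predicate f
theorem pv_main (f : Nat → Bool) (n : Nat) :
    (List.range n).foldl (fun p i =>
      if f i then
        if i ≤ 4 then p + 3
        else if 5 ≤ i ∧ i ≤ 9 then p + 4
        else if 10 ≤ i ∧ i ≤ 12 then p + 5
        else if i = 13 then p + 6
        else p
      else p) 0
    = 3 * pvBoolSum (((List.range n).map f).take 14)
      + pvBoolSum ((((List.range n).map f).drop 5).take 9)
      + pvBoolSum ((((List.range n).map f).drop 10).take 4)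
      + pvBoolSum ((((List.range n).map f).drop 13).take 1) := by
  induction n with
  | zero => simp [pvBoolSum]
  | succ n ih =>
      rw [List.range_succ, List.foldl_append, List.map_append]
      simp only [List.map_cons, List.map_nil]
      have hlen : ((List.range n).map f).length = n := by simp
      have h0 := pv_band_snoc ((List.range n).map f) (f n) 0 14
      have h5 := pv_band_snoc ((List.range n).map f) (f n) 5 9
      have h10 := pv_band_snoc ((List.range n).map f) (f n) 10 4
      have h13 := pv_band_snoc ((List.range n).map f) (f n) 13 1
      rw [hlen] at h0 h5 h10 h13
      simp only [List.drop_zero] at h0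
      rw [h0, h5, h10, h13, List.foldl_cons, List.foldl_nil, ih]
      by_cases hf : f n <;> simp [hf] <;> split_ifs <;> omega

-- ===== VERDICT (by name: the statement is the Claim_ definition above) =====
theorem feladatsort_pontoz_spec : Claim_equal_feladatsort_pontoz := by
  intro helyesek mostaniak _ _
  unfold Spec_feladatsort_pontoz feladatsort_pontoz feladatsort_pontoz_alt pvMatches
  simp only []
  have hstep : (fun (p : Int) (index : Nat) =>
      if helyesek.getD index "" = mostaniak.getD index "" then
        if index ≤ 4 then p + 3
        else if 5 ≤ index ∧ index ≤ 9 then p + 4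
        else if 10 ≤ index ∧ index ≤ 12 then p + 5
        else if index = 13 then p + 6
        else p
      else p)
    = (fun (p : Int) (i : Nat) =>
      if (helyesek.getD i "" == mostaniak.getD i "") then
        if i ≤ 4 then p + 3
        else if 5 ≤ i ∧ i ≤ 9 then p + 4
        else if 10 ≤ i ∧ i ≤ 12 then p + 5
        else if i = 13 then p + 6
        else p
      else p) := by
    funext p i
    by_cases h : helyesek.getD i "" = mostaniak.getD i "" <;> simp [h]
  rw [hstep, pv_main (fun i => helyesek.getD i "" == mostaniak.getD i "") helyesek.length]
  simp [pysem]
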